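-- pv_equiv track=rewrite | github.com/yyamano/RESTx | src/python/restx/render/htmlrenderer.py | __render_breadcrumbs
-- ===== SOURCE A (Python) =====
-- def __render_breadcrumbs(breadcrumbs):
--     """
--     Output HTML for breadcrumbs.
--
--     Breadcrumbs are given as a list of tuples, with each tuple containing
--     a (name,URI). The last breadcrumb should not be rendered as a clickable
--     link.
--
--     @param breadcrumbs:   List of breadcrumbs.
--     @type breadcrumbs:    list
--
--     @return:              HTML for breadcrumbs.
--     @rtype:               string
--
--     """
--     segments = []
--     for i, elem in enumerate(breadcrumbs):
--         name, uri = elem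
--         if i < len(breadcrumbs)-1:
--             # All but the last element are rendered as clickable links
--             segments.append('<a href="%s">%s</a>' % (uri, name))
--         else:
--             segments.append(name)
--     return " > ".join(segments)
-- ===== SOURCE B (Python) =====
-- def __render_breadcrumbs(breadcrumbs):
--     if not breadcrumbs:
--         return ""
--
--     def rec(items):
--         name, uri = items[0]
--         if len(items) == 1:
--             return name
--         return '<a href="%s">%s</a> > ' % (uri, name) + rec(items[1:])
--
--     return rec(breadcrumbs)
-- ===== Notes on version B (the rewrite author's own statement) =====
-- stated objective: alternative
-- what changed: B replaces the enumerate loop that tests the index against len-1 and then joins a segments list with a direct recursive decomposition: one element renders as its bare name, otherwise the head is emitted as a link with the separator and the function recurses on the tail, building the string directly with no segments list and no join.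
import Mathlib
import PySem

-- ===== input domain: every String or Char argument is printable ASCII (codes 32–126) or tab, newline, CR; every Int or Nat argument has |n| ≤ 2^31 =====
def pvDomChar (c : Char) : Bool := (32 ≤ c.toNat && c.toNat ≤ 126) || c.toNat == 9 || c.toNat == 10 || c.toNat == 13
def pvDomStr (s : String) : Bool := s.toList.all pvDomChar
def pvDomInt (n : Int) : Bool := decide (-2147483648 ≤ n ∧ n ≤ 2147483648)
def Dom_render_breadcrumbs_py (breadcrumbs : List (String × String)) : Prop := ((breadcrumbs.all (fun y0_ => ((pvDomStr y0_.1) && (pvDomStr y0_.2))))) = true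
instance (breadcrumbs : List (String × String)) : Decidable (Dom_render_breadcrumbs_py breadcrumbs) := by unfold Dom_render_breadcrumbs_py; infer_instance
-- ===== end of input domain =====

-- B renders the breadcrumbs by direct recursion on the list (last element = bare name,
-- otherwise head link + separator + recursion on the tail), with no segments list and no join.


-- ===== PORT A =====
-- for i, elem in enumerate(breadcrumbs): name, uri = elem; if i < len(breadcrumbs)-1: append link else append name
def render_breadcrumbs_py (breadcrumbs : List (String × String)) : String :=
  let segments : List String :=
    (PySem.List.enumerate breadcrumbs).foldl (fun segs ie =>
      let name := ie.2.1
      let uri := ie.2.2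
      if ie.1 < (breadcrumbs.length : Int) - 1 then
        segs ++ ["<a href=\"" ++ uri ++ "\">" ++ name ++ "</a>"]
      else
        segs ++ [name]) []
  PySem.Str.join " > " segments

-- ===== PORT B =====
-- def rec(items): name, uri = items[0]; if len(items)==1: return name;
--                 return '<a href="%s">%s</a> > ' % (uri, name) + rec(items[1:])
-- rec is only ever called on nonempty lists; the [] branch is unreachable (items[0] would raise).
def rbRec : List (String × String) → String
  | [] => ""
  | [(name, _uri)] => name
  | (name, uri) :: rest@(_ :: _) =>
      "<a href=\"" ++ uri ++ "\">" ++ name ++ "</a> > " ++ rbRec rest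

def render_breadcrumbs_py_alt (breadcrumbs : List (String × String)) : String :=
  if breadcrumbs = [] then "" else rbRec breadcrumbs

-- ===== PRECONDITION & SPEC =====
def Spec_render_breadcrumbs_py (breadcrumbs : List (String × String)) (out : String) : Prop := out = render_breadcrumbs_py_alt breadcrumbs
instance (breadcrumbs : List (String × String)) (out : String) : Decidable (Spec_render_breadcrumbs_py breadcrumbs out) := by unfold Spec_render_breadcrumbs_py; infer_instance

-- ===== CLAIM (what is proved, stated in full; the proofs are below) =====
def Claim_equal_render_breadcrumbs_py : Prop := ∀ (breadcrumbs : List (String × String)), Dom_render_breadcrumbs_py breadcrumbs → Spec_render_breadcrumbs_py breadcrumbs (render_breadcrumbs_py breadcrumbs)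

-- ===== LEMMAS AND PROOFS =====

-- A's loop builds the mapped list of its per-element choice.
theorem segsA_eq (breadcrumbs : List (String × String)) :
    (PySem.List.enumerate breadcrumbs).foldl (fun segs ie =>
      let name := ie.2.1
      let uri := ie.2.2
      if ie.1 < (breadcrumbs.length : Int) - 1 then
        segs ++ ["<a href=\"" ++ uri ++ "\">" ++ name ++ "</a>"]
      else
        segs ++ [name]) []
    = (PySem.List.enumerate breadcrumbs).map (fun ie =>
        if ie.1 < (breadcrumbs.length : Int) - 1 then
          "<a href=\"" ++ ie.2.2 ++ "\">" ++ ie.2.1 ++ "</a>"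
        else ie.2.1) := by
  have h : ∀ (acc : List String),
      (PySem.List.enumerate breadcrumbs).foldl (fun segs ie =>
        let name := ie.2.1
        let uri := ie.2.2
        if ie.1 < (breadcrumbs.length : Int) - 1 then
          segs ++ ["<a href=\"" ++ uri ++ "\">" ++ name ++ "</a>"]
        else
          segs ++ [name]) acc
      = (PySem.List.enumerate breadcrumbs).foldl (fun segs ie =>
          segs ++ [if ie.1 < (breadcrumbs.length : Int) - 1 then
            "<a href=\"" ++ ie.2.2 ++ "\">" ++ ie.2.1 ++ "</a>" else ie.2.1]) acc := by
    intro acc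
    apply PySem.List.foldl_congr_mem
    intro segs ie _
    by_cases hc : ie.1 < (breadcrumbs.length : Int) - 1 <;> simp [hc]
  rw [h [], PySem.List.foldl_append_singleton_eq_map, List.nil_append]

-- Python's sep.join on a cons with nonempty tail.
theorem join_cons_of_ne (sep a : String) (l : List String) (hl : l ≠ []) :
    PySem.Str.join sep (a :: l) = a ++ sep ++ PySem.Str.join sep l := by
  obtain ⟨q, rest, rfl⟩ := List.exists_cons_of_ne_nil hl
  rw [← String.toList_inj]
  simp only [PySem.Str.toList_join, List.map_cons, String.toList_append]
  rw [PySem.Chars.join_cons_cons]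

-- Joining the links of ys followed by the bare last name is B's recursion on ys ++ [z].
theorem join_links_eq_rbRec (ys : List (String × String)) (z : String × String) :
    PySem.Str.join " > "
      (ys.map (fun p => "<a href=\"" ++ p.2 ++ "\">" ++ p.1 ++ "</a>") ++ [z.1])
    = rbRec (ys ++ [z]) := by
  induction ys with
  | nil =>
    obtain ⟨zn, zu⟩ := z
    rw [← String.toList_inj]
    simp [PySem.Str.toList_join, PySem.Chars.join_singleton, rbRec]
  | cons p ys ih =>
    obtain ⟨n, u⟩ := p
    rw [List.map_cons, List.cons_append,
        join_cons_of_ne _ _ _ (by simp), ih]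
    have hne : ys ++ [z] ≠ [] := by simp
    obtain ⟨q, rest, hq⟩ := List.exists_cons_of_ne_nil hne
    rw [List.cons_append, hq]
    show _ = rbRec ((n, u) :: q :: rest)
    rw [rbRec]
    rw [← String.toList_inj]
    simp [String.toList_append]

theorem render_breadcrumbs_py_spec : Claim_equal_render_breadcrumbs_py := by
  intro bs _
  unfold Spec_render_breadcrumbs_py render_breadcrumbs_py render_breadcrumbs_py_alt
  induction bs using List.reverseRecOn with
  | nil => decide
  | append_singleton ys z _ =>
    have hne : ys ++ [z] ≠ [] := by simp
    rw [if_neg hne]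
    simp only [segsA_eq]
    rw [← join_links_eq_rbRec ys z]
    congr 1
    rw [PySem.List.enumerate_append]
    simp only [List.map_append]
    congr 1
    · have h1 : ∀ p ∈ PySem.List.enumerate ys,
          (fun (ie : Int × String × String) =>
            if ie.1 < ((ys ++ [z]).length : Int) - 1 then
              "<a href=\"" ++ ie.2.2 ++ "\">" ++ ie.2.1 ++ "</a>" else ie.2.1) p
          = "<a href=\"" ++ p.2.2 ++ "\">" ++ p.2.1 ++ "</a>" := by
        intro p hp
        rw [PySem.List.mem_enumerate_iff] at hp
        obtain ⟨k, hk, rfl⟩ := hp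
        have hc : (0 + (k : Int)) < ((ys ++ [z]).length : Int) - 1 := by
          simp; omega
        exact if_pos hc
      rw [List.map_congr_left h1,
          show (fun (p : Int × String × String) =>
            "<a href=\"" ++ p.2.2 ++ "\">" ++ p.2.1 ++ "</a>")
          = ((fun (q : String × String) => "<a href=\"" ++ q.2 ++ "\">" ++ q.1 ++ "</a>") ∘ Prod.snd) from rfl,
          ← List.map_map, PySem.List.map_snd_enumerate]
    · simp [PySem.List.enumerate]
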